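-- pv_equiv track=rewrite | github.com/Nikil263/Assignment2_NLP | utils/ngrams.py | n3
-- ===== SOURCE A (Python) =====
-- def n3(x,y,f3):
--     r11=[]
--     r15=[]
--     r110=[]
--     co=0
--     for a, b, c in f3:
--
--         if(a == x and b == y and c!= None):
--             co=co+1
--             if(co==1):
--                 r11.append(c)
--             if(co<=5):
--                 r15.append(c)
--             if(co<=10):
--                 r110.append(c)
--     return r11,r15,r110
-- ===== SOURCE B (Python) =====
-- def n3(x, y, f3):
--     # Early-terminating scan: stop as soon as 10 continuations are found;
--     # A always traverses the whole list.
--     found = []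
--     i = 0
--     n = len(f3)
--     while i < n and len(found) < 10:
--         a, b, c = f3[i]
--         if a == x and b == y and c != None:
--             found.append(c)
--         i += 1
--     return found[:1], found[:5], found
-- ===== Notes on version B (the rewrite author's own statement) =====
-- stated objective: alternative
-- what changed: Replaces A's full traversal with counter-gated appends into three accumulators by an early-terminating scan that stops as soon as 10 matches are collected into one list, returning that list and its 1- and 5-element prefixes.
import Mathlib
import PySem

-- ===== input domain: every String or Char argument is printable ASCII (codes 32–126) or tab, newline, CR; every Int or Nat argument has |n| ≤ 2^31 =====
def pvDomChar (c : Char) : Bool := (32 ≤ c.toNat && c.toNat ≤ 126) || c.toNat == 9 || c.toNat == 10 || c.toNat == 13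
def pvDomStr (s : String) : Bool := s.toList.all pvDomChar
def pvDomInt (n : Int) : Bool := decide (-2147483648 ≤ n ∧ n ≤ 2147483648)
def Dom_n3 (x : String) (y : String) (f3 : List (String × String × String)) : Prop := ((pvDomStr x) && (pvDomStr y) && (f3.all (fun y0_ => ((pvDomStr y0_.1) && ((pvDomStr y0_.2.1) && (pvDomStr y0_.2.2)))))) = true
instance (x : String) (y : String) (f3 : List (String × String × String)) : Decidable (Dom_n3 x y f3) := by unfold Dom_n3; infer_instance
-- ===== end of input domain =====

-- B replaces A's counter-gated triple accumulation over the whole list by an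
-- early-terminating scan that stops after 10 matches; return values agree (alternative decomposition).


-- ===== PORT A =====
-- one loop iteration of A; 'c != None' is always true here since c is a str
def n3Step (x : String) (y : String)
    (st : List String × List String × List String × Int)
    (t : String × String × String) : List String × List String × List String × Int :=
  if t.1 == x && t.2.1 == y then
    let co := st.2.2.2 + 1
    ((if co == 1 then st.1 ++ [t.2.2] else st.1),
     (if co ≤ 5 then st.2.1 ++ [t.2.2] else st.2.1),
     (if co ≤ 10 then st.2.2.1 ++ [t.2.2] else st.2.2.1),
     co)
  else st

def n3 (x : String) (y : String) (f3 : List (String × String × String)) : List String × List String × List String :=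
  let s := f3.foldl (n3Step x y) ([], [], [], 0)
  (s.1, s.2.1, s.2.2.1)

-- ===== PORT B =====
-- B's while loop: walk the items in order, stopping as soon as 10 matches are found
def n3AltGo (x : String) (y : String) :
    List (String × String × String) → List String → List String
  | [], found => found
  | t :: rest, found =>
    if found.length < 10 then
      if t.1 == x && t.2.1 == y then n3AltGo x y rest (found ++ [t.2.2])
      else n3AltGo x y rest found
    else found

def n3_alt (x : String) (y : String) (f3 : List (String × String × String)) : List String × List String × List String :=
  let found := n3AltGo x y f3 []
  (found.take 1, found.take 5, found)

-- ===== PRECONDITION & SPEC =====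
def Spec_n3 (x : String) (y : String) (f3 : List (String × String × String)) (out : List String × List String × List String) : Prop := out = n3_alt x y f3
instance (x : String) (y : String) (f3 : List (String × String × String)) (out : List String × List String × List String) : Decidable (Spec_n3 x y f3 out) := by unfold Spec_n3; infer_instance

-- ===== CLAIM (what is proved, stated in full; the proofs are below) =====
def Claim_equal_n3 : Prop := ∀ (x : String) (y : String) (f3 : List (String × String × String)), Dom_n3 x y f3 → Spec_n3 x y f3 (n3 x y f3)

-- ===== LEMMAS AND PROOFS =====

theorem take_append_single {α : Type} (m : List α) (c : α) (n : Nat) :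
    (m ++ [c]).take n = m.take n ++ (if m.length < n then [c] else []) := by
  induction m generalizing n with
  | nil => cases n <;> simp
  | cons h t ih =>
    cases n with
    | zero => simp
    | succ k => simp [ih k]

-- A's loop computes the three prefixes of the full filtered list
theorem n3_loop_inv (x y : String) (rest : List (String × String × String)) (m : List String) :
    rest.foldl (n3Step x y) (m.take 1, m.take 5, m.take 10, (m.length : Int)) =
      (let all := m ++ (rest.filter (fun t => t.1 == x && t.2.1 == y)).map (fun t => t.2.2)
       (all.take 1, all.take 5, all.take 10, (all.length : Int))) := by
  induction rest generalizing m with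
  | nil => simp
  | cons t rest ih =>
    by_cases hp : (t.1 == x && t.2.1 == y) = true
    · have step : n3Step x y (m.take 1, m.take 5, m.take 10, (m.length : Int)) t =
          ((m ++ [t.2.2]).take 1, (m ++ [t.2.2]).take 5, (m ++ [t.2.2]).take 10,
           ((m ++ [t.2.2]).length : Int)) := by
        simp only [n3Step, hp, if_true]
        refine Prod.ext ?_ (Prod.ext ?_ (Prod.ext ?_ ?_)) <;>
          simp [take_append_single] <;> split_ifs <;> simp_all
      simp only [List.foldl_cons, step, ih (m ++ [t.2.2]), List.filter_cons, hp, if_true,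
        List.map_cons, List.append_assoc, List.cons_append, List.nil_append]
    · simp only [List.foldl_cons, n3Step, hp, if_false, List.filter_cons,
        Bool.false_eq_true]
      exact ih m

-- B's early-terminating scan collects exactly the first (10 - |acc|) matches after acc
theorem n3AltGo_eq (x y : String) (l : List (String × String × String)) (acc : List String) :
    n3AltGo x y l acc =
      acc ++ ((l.filter (fun t => t.1 == x && t.2.1 == y)).map (fun t => t.2.2)).take (10 - acc.length) := by
  induction l generalizing acc with
  | nil => simp [n3AltGo]
  | cons t rest ih =>
    by_cases hlen : acc.length < 10
    · by_cases hp : (t.1 == x && t.2.1 == y) = true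
      · have h1 : 10 - acc.length = (10 - (acc.length + 1)) + 1 := by omega
        simp only [n3AltGo, hlen, if_true, hp, ih, List.filter_cons, List.map_cons,
          List.length_append, List.length_cons, List.length_nil, h1, List.take_succ_cons,
          List.append_assoc, List.cons_append, List.nil_append]
      · simp only [n3AltGo, hlen, if_true, hp, Bool.false_eq_true, ite_false, ih,
          List.filter_cons]
    · have h0 : 10 - acc.length = 0 := by omega
      simp [n3AltGo, hlen, h0]

-- ===== VERDICT (by name: the statement is the Claim_ definition above) =====
theorem n3_spec : Claim_equal_n3 := by
  intro x y f3 _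
  show _ = _
  have hA := n3_loop_inv x y f3 []
  simp only [List.take_nil, List.length_nil, Nat.cast_zero, List.nil_append] at hA
  have hB := n3AltGo_eq x y f3 []
  simp only [List.length_nil, Nat.sub_zero, List.nil_append] at hB
  simp [n3, n3_alt, hA, hB, List.take_take]
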